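-- pv_equiv track=rewrite | github.com/yammouch/python_lesson | 2080_yoshimura/s0020.py | htruck_range
-- ===== SOURCE A (Python) =====
-- def htruck_range(us, ds):
--   retval = {}
--   for i, pair in enumerate(zip(us, ds)):
--     for x in pair:
--       if x in retval:
--         retval[x][1] = i
--       else:
--         retval[x] = [i, None]
--   if None in retval:
--     del retval[None]
--   return retval
-- ===== SOURCE B (Python) =====
-- def htruck_range(us, ds):
--     occ = {}
--     for i, (u, d) in enumerate(zip(us, ds)):
--         occ.setdefault(u, []).append(i)
--         occ.setdefault(d, []).append(i)
--     return {v: [ix[0], ix[-1] if len(ix) > 1 else None]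
--             for v, ix in occ.items() if v is not None}
-- ===== Notes on version B (the rewrite author's own statement) =====
-- stated objective: alternative
-- what changed: A maintains per-key [first, sentinel] lists and overwrites the sentinel slot in place on every repeat; B first builds a dict of full occurrence-index lists in one pass, then reshapes each list into [first, last-or-None] in a comprehension that skips the None key (no in-place mutation, no post-hoc del).
import Mathlib
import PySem

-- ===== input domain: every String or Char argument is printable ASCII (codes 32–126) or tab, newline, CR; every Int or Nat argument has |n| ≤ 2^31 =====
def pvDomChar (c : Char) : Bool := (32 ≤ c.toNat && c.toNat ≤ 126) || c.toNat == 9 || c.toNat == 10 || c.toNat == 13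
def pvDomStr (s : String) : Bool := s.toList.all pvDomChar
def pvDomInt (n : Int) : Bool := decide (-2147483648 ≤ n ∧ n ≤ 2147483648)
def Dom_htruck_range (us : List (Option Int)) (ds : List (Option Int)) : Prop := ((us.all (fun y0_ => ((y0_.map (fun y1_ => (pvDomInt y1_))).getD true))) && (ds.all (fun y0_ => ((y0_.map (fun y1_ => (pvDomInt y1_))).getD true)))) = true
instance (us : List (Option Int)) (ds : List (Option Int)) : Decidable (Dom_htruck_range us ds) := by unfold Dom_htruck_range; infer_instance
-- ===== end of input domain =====

-- B replaces A's in-place sentinel-overwrite dict loop by building an occurrence-index dict once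
-- and reshaping it into first/last entries (objective: alternative decomposition, same cost).
-- Python dict keys are `Option Int` during the loop (None is a possible key); per the type
-- convention the RETURNED dict has Int keys, so both ports unwrap the (provably `some`) keys
-- at the end.

-- ===== PORT A =====
-- the body of A's inner `for x in pair` loop
def htruckStepA (i : Int) (d : PySem.Dict (Option Int) (List (Option Int))) (x : Option Int) :
    PySem.Dict (Option Int) (List (Option Int)) :=
  if d.contains x then d.modify x [] (fun v => v.set 1 (some i))  -- retval[x][1] = i
  else d.insert x [some i, none]                                  -- retval[x] = [i, None]

-- `if None in retval: del retval[None]`, then `return retval` unwrapped to Int keys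
def htruckFinishA (r : PySem.Dict (Option Int) (List (Option Int))) :
    List (Int × List (Option Int)) :=
  (if r.contains none then r.erase none else r).items.filterMap
    (fun p => p.1.map (fun k => (k, p.2)))

def htruck_range (us : List (Option Int)) (ds : List (Option Int)) : List (Int × List (Option Int)) :=
  htruckFinishA ((PySem.List.enumerate (us.zip ds)).foldl
    (fun d p => htruckStepA p.1 (htruckStepA p.1 d p.2.1) p.2.2)
    PySem.Dict.empty)

-- ===== PORT B =====
-- [ix[0], ix[-1] if len(ix) > 1 else None]  (ix is never [] in Source B; pyGet? is exact there)
def htruckReshape (ix : List Int) : List (Option Int) :=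
  [PySem.List.pyGet? ix 0, if 1 < ix.length then PySem.List.pyGet? ix (-1) else none]

def htruck_range_alt (us : List (Option Int)) (ds : List (Option Int)) : List (Int × List (Option Int)) :=
  -- occ: value -> list of the indices of the pairs it occurs in (setdefault+append loop)
  ((PySem.List.enumerate (us.zip ds)).foldl
    (fun d p => (d.modify p.2.1 [] (· ++ [p.1])).modify p.2.2 [] (· ++ [p.1]))
    (PySem.Dict.empty : PySem.Dict (Option Int) (List Int))).items.filterMap
    -- {v: [ix[0], ix[-1] if len(ix) > 1 else None] for v, ix in occ.items() if v is not None}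
    (fun p => p.1.map (fun k => (k, htruckReshape p.2)))

-- ===== PRECONDITION & SPEC =====
def Spec_htruck_range (us : List (Option Int)) (ds : List (Option Int)) (out : List (Int × List (Option Int))) : Prop := out = htruck_range_alt us ds
instance (us : List (Option Int)) (ds : List (Option Int)) (out : List (Int × List (Option Int))) : Decidable (Spec_htruck_range us ds out) := by unfold Spec_htruck_range; infer_instance

-- ===== CLAIM (what is proved, stated in full; the proofs are below) =====
def Claim_equal_htruck_range : Prop := ∀ (us : List (Option Int)) (ds : List (Option Int)), Dom_htruck_range us ds → Spec_htruck_range us ds (htruck_range us ds)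

-- ===== LEMMAS AND PROOFS =====

-- the reshaped entry for a single index
theorem htruckReshape_singleton (i : Int) : htruckReshape [i] = [some i, none] := rfl

-- appending a later index overwrites slot 1, exactly A's `retval[x][1] = i`
theorem htruckReshape_append (v : List Int) (i : Int) (hv : v ≠ []) :
    htruckReshape (v ++ [i]) = (htruckReshape v).set 1 (some i) := by
  cases v with
  | nil => exact absurd rfl hv
  | cons a t =>
    have h0 : (0:Int) ≤ (t.length:Int) + 1 := by omega
    simp [htruckReshape, PySem.List.pyGet?, PySem.List.pyIdx?, h0]

-- the invariant tying A's dict to B's dict: same keys in the same order, A's value is the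
-- reshape of B's (nonempty) index list
def htruckCorr (dA : PySem.Dict (Option Int) (List (Option Int)))
    (oB : PySem.Dict (Option Int) (List Int)) : Prop :=
  dA.items = oB.items.map (fun p => (p.1, htruckReshape p.2)) ∧ ∀ p ∈ oB.items, p.2 ≠ []

theorem htruckCorr_contains (dA : PySem.Dict (Option Int) (List (Option Int)))
    (oB : PySem.Dict (Option Int) (List Int)) (h : htruckCorr dA oB) (x : Option Int) :
    dA.contains x = oB.contains x := by
  simp [PySem.Dict.contains, h.1, List.any_map, Function.comp_def]

theorem htruckCorr_get? (dA : PySem.Dict (Option Int) (List (Option Int)))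
    (oB : PySem.Dict (Option Int) (List Int)) (h : htruckCorr dA oB) (x : Option Int) :
    dA.get? x = (oB.get? x).map htruckReshape := by
  simp [PySem.Dict.get?, h.1, List.find?_map, Function.comp_def]

theorem htruckCorr_step (i : Int) (x : Option Int)
    (dA : PySem.Dict (Option Int) (List (Option Int)))
    (oB : PySem.Dict (Option Int) (List Int)) (h : htruckCorr dA oB) :
    htruckCorr (htruckStepA i dA x) (oB.modify x [] (· ++ [i])) := by
  have hcont := htruckCorr_contains dA oB h x
  have hne' : ∀ p ∈ (oB.modify x [] (· ++ [i])).items, p.2 ≠ [] := by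
    intro p hp
    rw [PySem.Dict.modify] at hp
    rcases (PySem.Dict.mem_items_insert _ _ _ _).mp hp with hpe | ⟨hpm, _⟩
    · rw [hpe]; simp
    · exact h.2 _ hpm
  refine ⟨?_, hne'⟩
  by_cases hc : oB.contains x = true
  · have hget := htruckCorr_get? dA oB h x
    rcases ho : oB.get? x with _ | v
    · rw [PySem.Dict.contains_eq_isSome_get?, ho] at hc; simp at hc
    have hvne : v ≠ [] := h.2 (x, v) (PySem.Dict.mem_items_of_get?_eq_some _ ho)
    have hdA : dA.getD x [] = htruckReshape v := by
      rw [PySem.Dict.getD_eq_get?_getD, hget, ho]; rfl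
    have hoB : oB.getD x [] = v := by rw [PySem.Dict.getD_eq_get?_getD, ho]; rfl
    simp only [htruckStepA, PySem.Dict.modify, hcont, hc, if_true]
    rw [PySem.Dict.items_insert, PySem.Dict.items_insert]
    simp only [hcont, hc, if_true, h.1, List.map_map]
    refine List.map_congr_left ?_
    intro p _
    by_cases hpx : p.1 = x
    · simp [hpx, hdA, hoB, htruckReshape_append v i hvne]
    · simp [hpx]
  · have hcf : oB.contains x = false := by simpa using hc
    simp only [htruckStepA, PySem.Dict.modify, hcont, hcf, if_false, Bool.false_eq_true]
    rw [PySem.Dict.items_insert, PySem.Dict.items_insert]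
    simp [hcont, hcf, h.1, PySem.Dict.getD_of_not_contains, htruckReshape_singleton]

theorem htruckCorr_fold (l : List (Int × (Option Int × Option Int)))
    (dA : PySem.Dict (Option Int) (List (Option Int)))
    (oB : PySem.Dict (Option Int) (List Int)) (h : htruckCorr dA oB) :
    htruckCorr
      (l.foldl (fun d p => htruckStepA p.1 (htruckStepA p.1 d p.2.1) p.2.2) dA)
      (l.foldl (fun d p => (d.modify p.2.1 [] (· ++ [p.1])).modify p.2.2 [] (· ++ [p.1])) oB) := by
  induction l generalizing dA oB with
  | nil => exact h
  | cons p t ih =>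
    exact ih _ _ (htruckCorr_step p.1 p.2.2 _ _ (htruckCorr_step p.1 p.2.1 _ _ h))

-- dropping the None key then unwrapping = filterMap that skips None keys
theorem filter_filterMap_none {β γ : Type} (l : List (Option Int × β))
    (g : Option Int × β → Int → γ) :
    (l.filter (fun p => p.1.isSome)).filterMap (fun p => p.1.map (g p))
      = l.filterMap (fun p => p.1.map (g p)) := by
  induction l with
  | nil => rfl
  | cons p t ih =>
    rcases p with ⟨k, b⟩
    cases k <;> simp [ih]

-- A's erase-under-if has the items of a plain filter
theorem htruck_erase_items (d : PySem.Dict (Option Int) (List (Option Int))) :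
    (if d.contains none then d.erase none else d).items
      = d.items.filter (fun p => p.1.isSome) := by
  by_cases hc : d.contains none = true
  · simp [hc, PySem.Dict.erase]
  · simp only [hc, Bool.false_eq_true, if_false]
    simp only [PySem.Dict.contains, List.any_eq_true, not_exists] at hc
    refine (List.filter_eq_self.mpr (fun p hp => ?_)).symm
    rw [Option.isSome_iff_ne_none]
    intro hnone
    exact hc p ⟨hp, by simp [hnone]⟩

-- ===== VERDICT (by name: the statement is the Claim_ definition above) =====
theorem htruck_range_spec : Claim_equal_htruck_range := by
  intro us ds _
  unfold Spec_htruck_range htruck_range htruck_range_alt htruckFinishA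
  have h := htruckCorr_fold (PySem.List.enumerate (us.zip ds)) PySem.Dict.empty PySem.Dict.empty
    ⟨rfl, by simp [PySem.Dict.empty]⟩
  rw [htruck_erase_items, filter_filterMap_none _ (fun p k => (k, p.2)), h.1,
    List.filterMap_map]
  rfl
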